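-- pv_equiv track=rewrite | github.com/liupengsay/PyIsTheBestLang | src/dp/matrix_dp/problem.py | lc_1745
-- ===== SOURCE A (Python) =====
-- def lc_1745(s: str) -> bool:
--     """
--     url: https://leetcode.cn/problems/palindrome-partitioning-iv/description/
--     tag: matrix_dp|palindrome_substring|manacher|brute_force
--     """
--     # matrix_dp判断是否为palindrome_substring，或者manacher然后brute_force
--     n = len(s)
--     dp = [[0] * n for _ in range(n)]
--     for i in range(n - 1, -1, -1):
--         dp[i][i] = 1
--         if i + 1 < n:
--             dp[i][i + 1] = int(s[i] == s[i + 1])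
--         for j in range(i + 2, n):
--             if s[i] == s[j] and dp[i + 1][j - 1]:
--                 dp[i][j] = 1
--
--     for i in range(1, n - 1):
--         for j in range(i, n - 1):
--             if dp[i][j] and dp[0][i - 1] and dp[j + 1][n - 1]:
--                 return True
--     return False
-- ===== SOURCE B (Python) =====
-- def lc_1745(s: str) -> bool:
--     # Direct check: try every pair of split points and test each part by reversal.
--     n = len(s)
--     return any(s[:a] == s[:a][::-1] and s[a:b] == s[a:b][::-1] and s[b:] == s[b:][::-1]
--                for a in range(1, n - 1) for b in range(a + 1, n))
-- ===== Notes on version B (the rewrite author's own statement) =====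
-- stated objective: simpler
-- what changed: B drops the O(n^2) interval-DP palindrome table entirely and directly tests every (a,b) split pair by slice reversal, a two-line any-comprehension.
import Mathlib
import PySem

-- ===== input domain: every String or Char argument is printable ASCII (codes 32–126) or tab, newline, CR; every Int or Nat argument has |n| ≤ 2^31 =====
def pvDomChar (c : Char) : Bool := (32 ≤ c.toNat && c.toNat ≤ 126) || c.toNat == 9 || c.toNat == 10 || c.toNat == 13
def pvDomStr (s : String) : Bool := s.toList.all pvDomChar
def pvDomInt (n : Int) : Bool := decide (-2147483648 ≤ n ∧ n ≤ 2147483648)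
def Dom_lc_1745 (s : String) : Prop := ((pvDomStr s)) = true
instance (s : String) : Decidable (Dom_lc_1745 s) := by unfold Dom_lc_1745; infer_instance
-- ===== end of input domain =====

-- B replaces A's interval-DP palindrome table by a direct slice-reversal test of every
-- (a, b) split pair; a genuinely different (table-free) algorithm, simpler, not faster.

-- ===== PORT A =====
-- dp[i][j] read (always in range in A)
def pvGet2 (dp : List (List Int)) (i j : Nat) : Int := (dp.getD i []).getD j 0
-- dp[i][j] = v (always in range in A)
def pvSet2 (dp : List (List Int)) (i j : Nat) (v : Int) : List (List Int) :=
  dp.set i ((dp.getD i []).set j v)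

-- body of "for j in range(i+2, n): if s[i] == s[j] and dp[i+1][j-1]: dp[i][j] = 1"
def lc1745Inner (cs : List Char) (i : Nat) (dp : List (List Int)) (j : Nat) : List (List Int) :=
  if cs.getD i ' ' = cs.getD j ' ' ∧ pvGet2 dp (i + 1) (j - 1) ≠ 0 then pvSet2 dp i j 1 else dp

-- body of the outer "for i in range(n-1, -1, -1)" loop: dp[i][i]=1, maybe dp[i][i+1], then the j loop
def lc1745Row (cs : List Char) (n : Nat) (dp : List (List Int)) (i : Nat) : List (List Int) :=
  (List.range' (i + 2) (n - (i + 2))).foldl (lc1745Inner cs i)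
    (if i + 1 < n then
       pvSet2 (pvSet2 dp i i 1) i (i + 1) (if cs.getD i ' ' = cs.getD (i + 1) ' ' then 1 else 0)
     else pvSet2 dp i i 1)

-- the filled dp table ("dp = [[0]*n for _ in range(n)]" then the outer loop)
def lc1745Table (cs : List Char) : List (List Int) :=
  ((List.range cs.length).reverse).foldl (lc1745Row cs cs.length)
    (List.replicate cs.length (List.replicate cs.length (0 : Int)))

-- "for i in range(1, n-1): for j in range(i, n-1): if dp[i][j] and dp[0][i-1] and dp[j+1][n-1]: return True"
def lc1745Scan (cs : List Char) (dp : List (List Int)) : Bool :=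
  (List.range' 1 (cs.length - 1 - 1)).any fun i =>
    (List.range' i (cs.length - 1 - i)).any fun j =>
      decide (pvGet2 dp i j ≠ 0 ∧ pvGet2 dp 0 (i - 1) ≠ 0 ∧
        pvGet2 dp (j + 1) (cs.length - 1) ≠ 0)

def lc_1745 (s : String) : Bool := lc1745Scan s.toList (lc1745Table s.toList)

-- ===== PORT B =====
-- t == t[::-1]
def pvIsPal (t : List Char) : Bool := decide (t = t.reverse)

def lc_1745_alt (s : String) : Bool :=
  (List.range' 1 (s.toList.length - 1 - 1)).any fun a =>
    (List.range' (a + 1) (s.toList.length - (a + 1))).any fun b =>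
      pvIsPal (s.toList.take a) && pvIsPal ((s.toList.drop a).take (b - a)) &&
        pvIsPal (s.toList.drop b)

-- ===== PRECONDITION & SPEC =====
def Spec_lc_1745 (s : String) (out : Bool) : Prop := out = lc_1745_alt s
instance (s : String) (out : Bool) : Decidable (Spec_lc_1745 s out) := by unfold Spec_lc_1745; infer_instance

-- ===== CLAIM (what is proved, stated in full; the proofs are below) =====
def Claim_equal_lc_1745 : Prop := ∀ (s : String), Dom_lc_1745 s → Spec_lc_1745 s (lc_1745 s)

-- ===== LEMMAS AND PROOFS =====

-- "s[i..j] (inclusive) is a palindrome", the meaning of A's dp[i][j]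
def palB (cs : List Char) (i j : Nat) : Bool := pvIsPal ((cs.drop i).take (j + 1 - i))

-- dp is an n×n table
def Shape (n : Nat) (dp : List (List Int)) : Prop :=
  dp.length = n ∧ ∀ r, r < n → (dp.getD r []).length = n

-- the in-range entries of dp are the 0/1 indicator of f
def TblEq (n : Nat) (dp : List (List Int)) (f : Nat → Nat → Bool) : Prop :=
  ∀ i j, i < n → j < n → pvGet2 dp i j = if f i j then 1 else 0

-- table contents after the rows ≥ i0 have been processed
def rowsDone (cs : List Char) (i0 : Nat) : Nat → Nat → Bool := fun i j =>
  decide (i0 ≤ i ∧ i ≤ j) && palB cs i j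

-- table contents in the middle of row i: row i is filled for columns < b
def rowPart (cs : List Char) (i b : Nat) : Nat → Nat → Bool := fun a c =>
  decide ((i < a ∨ (a = i ∧ c < b)) ∧ a ≤ c) && palB cs a c

theorem TblEq_congr {n : Nat} {dp : List (List Int)} {f g : Nat → Nat → Bool}
    (h : ∀ i j, i < n → j < n → f i j = g i j) (H : TblEq n dp f) : TblEq n dp g := by
  intro i j hi hj; rw [← h i j hi hj]; exact H i j hi hj

theorem getD_set_gen {α : Type} (l : List α) (i r : Nat) (x d : α) :
    (l.set i x).getD r d = if i = r ∧ i < l.length then x else l.getD r d := by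
  rw [List.getD_eq_getElem?_getD, List.getElem?_set]
  by_cases h1 : i = r
  · subst h1
    by_cases h2 : i < l.length
    · simp [h2]
    · have hn : l[i]? = none := List.getElem?_eq_none (by omega)
      simp [h2, List.getD_eq_getElem?_getD]
  · simp [h1, List.getD_eq_getElem?_getD]

theorem shape_set {n : Nat} {dp : List (List Int)} (h : Shape n dp) (i j : Nat) (v : Int) :
    Shape n (pvSet2 dp i j v) := by
  obtain ⟨h1, h2⟩ := h
  refine ⟨by simp [pvSet2, h1], ?_⟩
  intro r hr
  unfold pvSet2
  rw [getD_set_gen]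
  split
  · next hc => rw [List.length_set]; exact h2 i (h1 ▸ hc.2)
  · exact h2 r hr

theorem get2_set_eq {n : Nat} {dp : List (List Int)} (h : Shape n dp) {i j : Nat}
    (hi : i < n) (hj : j < n) (v : Int) : pvGet2 (pvSet2 dp i j v) i j = v := by
  obtain ⟨h1, h2⟩ := h
  unfold pvGet2 pvSet2
  rw [getD_set_gen, if_pos ⟨rfl, h1 ▸ hi⟩, getD_set_gen, if_pos ⟨rfl, (h2 i hi) ▸ hj⟩]

theorem get2_set_ne {dp : List (List Int)} {i j i' j' : Nat}
    (h : ¬(i = i' ∧ j = j')) (v : Int) : pvGet2 (pvSet2 dp i j v) i' j' = pvGet2 dp i' j' := by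
  unfold pvGet2 pvSet2
  rw [getD_set_gen]
  split
  · next hc =>
    have hjj : j ≠ j' := fun hh => h ⟨hc.1, hh⟩
    rw [← hc.1, getD_set_gen, if_neg (fun hh => hjj hh.1)]
  · rfl

-- ---- palindrome facts ----
theorem palB_self (cs : List Char) (i : Nat) : palB cs i i = true := by
  have h1 : i + 1 - i = 1 := by omega
  unfold palB pvIsPal
  rw [h1]
  rcases h : cs.drop i with _ | ⟨a, l⟩ <;> simp

theorem palB_pair {cs : List Char} {i : Nat} (h : i + 1 < cs.length) :
    palB cs i (i + 1) = decide (cs.getD i ' ' = cs.getD (i + 1) ' ') := by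
  have h2 : i + 1 + 1 - i = 2 := by omega
  have hd : cs.drop i = cs[i] :: cs.drop (i + 1) := List.drop_eq_getElem_cons (by omega)
  have hd2 : cs.drop (i + 1) = cs[i + 1] :: cs.drop (i + 2) := List.drop_eq_getElem_cons h
  have g1 : cs.getD i ' ' = cs[i] := List.getD_eq_getElem cs ' ' (by omega)
  have g2 : cs.getD (i + 1) ' ' = cs[i + 1] := List.getD_eq_getElem cs ' ' h
  unfold palB pvIsPal
  rw [h2, hd, hd2, g1, g2]
  refine decide_eq_decide.mpr ?_
  simp only [List.take_succ_cons, List.take_zero, List.reverse_cons, List.reverse_nil,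
    List.nil_append, List.cons_append, List.cons.injEq, and_true]
  constructor
  · rintro ⟨u, v⟩; exact u
  · intro u; exact ⟨u, u.symm⟩

theorem pal_cons_append (x y : Char) (m : List Char) :
    decide (x :: (m ++ [y]) = (x :: (m ++ [y])).reverse) =
      (decide (x = y) && decide (m = m.reverse)) := by
  have hrev : (x :: (m ++ [y])).reverse = y :: (m.reverse ++ [x]) := by simp
  have hiff : (x :: (m ++ [y]) = (x :: (m ++ [y])).reverse) ↔ (x = y ∧ m = m.reverse) := by
    rw [hrev]
    constructor
    · intro h
      rw [List.cons.injEq] at h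
      obtain ⟨h1, h2⟩ := h
      subst h1
      exact ⟨rfl, (List.append_left_inj [x]).mp h2⟩
    · rintro ⟨rfl, h2⟩
      rw [← h2]
  rw [decide_eq_decide.mpr hiff]
  by_cases h1 : x = y
  · by_cases h2 : m = m.reverse
    · rw [decide_eq_true (⟨h1, h2⟩ : x = y ∧ m = m.reverse), decide_eq_true h1,
        decide_eq_true h2]
      rfl
    · rw [decide_eq_false (fun hh => h2 hh.2), decide_eq_false h2]
      simp
  · rw [decide_eq_false (fun hh => h1 hh.1), decide_eq_false h1]
    simp

theorem palB_rec {cs : List Char} {i j : Nat} (h2 : i + 2 ≤ j) (hj : j < cs.length) :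
    palB cs i j = (decide (cs.getD i ' ' = cs.getD j ' ') && palB cs (i + 1) (j - 1)) := by
  have hi : i < cs.length := by omega
  have hsplit : (cs.drop i).take (j + 1 - i) =
      cs[i] :: (((cs.drop (i + 1)).take (j - 1 - i)) ++ [cs[j]]) := by
    have hd : cs.drop i = cs[i] :: cs.drop (i + 1) := List.drop_eq_getElem_cons hi
    have e1 : j + 1 - i = (j - i - 1) + 2 := by omega
    rw [hd, e1]
    simp only [List.take_succ_cons]
    congr 1
    rw [List.take_add_one]
    have hget : (cs.drop (i + 1))[j - i - 1]? = some cs[j] := by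
      rw [List.getElem?_drop]
      have e : i + 1 + (j - i - 1) = j := by omega
      rw [e]
      exact List.getElem?_eq_getElem hj
    rw [hget]
    have e3 : j - i - 1 = j - 1 - i := by omega
    simp [e3]
  have e4 : palB cs (i + 1) (j - 1) =
      decide ((cs.drop (i + 1)).take (j - 1 - i) = ((cs.drop (i + 1)).take (j - 1 - i)).reverse) := by
    unfold palB pvIsPal
    rw [show j - 1 + 1 - (i + 1) = j - 1 - i from by omega]
  calc palB cs i j
      = (decide (cs[i] = cs[j]) && decide ((cs.drop (i + 1)).take (j - 1 - i) =
          ((cs.drop (i + 1)).take (j - 1 - i)).reverse)) := by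
        unfold palB pvIsPal
        rw [hsplit, pal_cons_append]
    _ = _ := by
        rw [e4, List.getD_eq_getElem cs ' ' hi, List.getD_eq_getElem cs ' ' hj]

-- ---- the DP fold fills the table with palB ----
theorem inner_step {cs : List Char} {n i j : Nat} {dp : List (List Int)}
    (hn : n = cs.length) (hij : i + 2 ≤ j) (hjn : j < n)
    (hs : Shape n dp) (ht : TblEq n dp (rowPart cs i j)) :
    Shape n (lc1745Inner cs i dp j) ∧ TblEq n (lc1745Inner cs i dp j) (rowPart cs i (j + 1)) := by
  have hmid : pvGet2 dp (i + 1) (j - 1) = if palB cs (i + 1) (j - 1) then 1 else 0 := by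
    rw [ht (i + 1) (j - 1) (by omega) (by omega)]
    have hcnd : ((i < i + 1 ∨ (i + 1 = i ∧ j - 1 < j)) ∧ i + 1 ≤ j - 1) := by omega
    simp [rowPart, hcnd]
  have hcond : (cs.getD i ' ' = cs.getD j ' ' ∧ pvGet2 dp (i + 1) (j - 1) ≠ 0) ↔
      palB cs i j = true := by
    rw [palB_rec hij (by omega), Bool.and_eq_true, decide_eq_true_eq, hmid]
    constructor
    · rintro ⟨hA, hB⟩
      refine ⟨hA, ?_⟩
      rcases hq : palB cs (i + 1) (j - 1)
      · rw [hq] at hB; simp at hB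
      · rfl
    · rintro ⟨hA, hB⟩
      exact ⟨hA, by rw [hB]; simp⟩
  unfold lc1745Inner
  split
  · next hc =>
    have hp : palB cs i j = true := hcond.mp hc
    refine ⟨shape_set hs i j 1, ?_⟩
    intro a b ha hb
    by_cases heq : i = a ∧ j = b
    · obtain ⟨rfl, rfl⟩ := heq
      rw [get2_set_eq hs (by omega) hjn]
      have hcnd : ((i < i ∨ (i = i ∧ j < j + 1)) ∧ i ≤ j) := by omega
      simp [rowPart, hcnd, hp]
    · rw [get2_set_ne heq 1, ht a b ha hb]
      have hcc : rowPart cs i j a b = rowPart cs i (j + 1) a b := by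
        unfold rowPart
        congr 1
        refine decide_eq_decide.mpr ?_
        constructor <;> intro hx <;> omega
      rw [hcc]
  · next hc =>
    have hp : palB cs i j = false := by
      rcases hq : palB cs i j
      · rfl
      · exact absurd (hcond.mpr hq) hc
    refine ⟨hs, ?_⟩
    intro a b ha hb
    rw [ht a b ha hb]
    by_cases heq : i = a ∧ j = b
    · obtain ⟨rfl, rfl⟩ := heq
      simp [rowPart, hp]
    · have hcc : rowPart cs i j a b = rowPart cs i (j + 1) a b := by
        unfold rowPart
        congr 1
        refine decide_eq_decide.mpr ?_
        constructor <;> intro hx <;> omega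
      rw [hcc]

theorem inner_fold {cs : List Char} {n i : Nat} (hn : n = cs.length) (hin : i < n) :
    ∀ c, i + 2 + c ≤ n → ∀ dp, Shape n dp → TblEq n dp (rowPart cs i (i + 2)) →
      Shape n ((List.range' (i + 2) c).foldl (lc1745Inner cs i) dp) ∧
      TblEq n ((List.range' (i + 2) c).foldl (lc1745Inner cs i) dp) (rowPart cs i (i + 2 + c)) := by
  intro c
  induction c with
  | zero => intro _ dp hs ht; exact ⟨hs, ht⟩
  | succ c ih =>
    intro hc dp hs ht
    have hstep := ih (by omega) dp hs ht
    rw [List.range'_concat]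
    simp only [List.foldl_append, List.foldl_cons, List.foldl_nil, Nat.one_mul]
    have hres := inner_step hn (i := i) (j := i + 2 + c) (by omega) (by omega) hstep.1 hstep.2
    rw [show i + 2 + c + 1 = i + 2 + (c + 1) from rfl] at hres
    exact hres

theorem row_step {cs : List Char} {n i : Nat} {dp : List (List Int)}
    (hn : n = cs.length) (_hin : i < n)
    (hs : Shape n dp) (ht : TblEq n dp (rowsDone cs (i + 1))) :
    Shape n (lc1745Row cs n dp i) ∧ TblEq n (lc1745Row cs n dp i) (rowsDone cs i) := by
  have hs1 : Shape n (pvSet2 dp i i 1) := shape_set hs i i 1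
  have hin : i < n := _hin
  have ht1 : TblEq n (pvSet2 dp i i 1) (rowPart cs i (i + 1)) := by
    intro a b ha hb
    by_cases heq : i = a ∧ i = b
    · obtain ⟨rfl, rfl⟩ := heq
      rw [get2_set_eq hs hin hin]
      have hcnd : ((i < i ∨ (i = i ∧ i < i + 1)) ∧ i ≤ i) := by omega
      simp [rowPart, palB_self]
    · rw [get2_set_ne heq 1, ht a b ha hb]
      have hcc : rowsDone cs (i + 1) a b = rowPart cs i (i + 1) a b := by
        unfold rowsDone rowPart
        congr 1
        refine decide_eq_decide.mpr ?_
        constructor <;> intro hx <;> omega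
      rw [hcc]
  unfold lc1745Row
  by_cases hi1 : i + 1 < n
  · rw [if_pos hi1]
    have hs2 : Shape n (pvSet2 (pvSet2 dp i i 1) i (i + 1)
        (if cs.getD i ' ' = cs.getD (i + 1) ' ' then 1 else 0)) :=
      shape_set hs1 i (i + 1) _
    have ht2 : TblEq n (pvSet2 (pvSet2 dp i i 1) i (i + 1)
        (if cs.getD i ' ' = cs.getD (i + 1) ' ' then 1 else 0)) (rowPart cs i (i + 2)) := by
      intro a b ha hb
      by_cases heq : i = a ∧ i + 1 = b
      · obtain ⟨rfl, rfl⟩ := heq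
        rw [get2_set_eq hs1 hin hi1]
        have hcnd : ((i < i ∨ (i = i ∧ i + 1 < i + 2)) ∧ i ≤ i + 1) := by omega
        simp only [rowPart, hcnd]
        rw [palB_pair (hn ▸ hi1)]
        by_cases hx : cs.getD i ' ' = cs.getD (i + 1) ' ' <;> simp [hx]
      · rw [get2_set_ne heq _, ht1 a b ha hb]
        have hcc : rowPart cs i (i + 1) a b = rowPart cs i (i + 2) a b := by
          unfold rowPart
          congr 1
          refine decide_eq_decide.mpr ?_
          constructor <;> intro hx <;> omega
        rw [hcc]
    have hfold := inner_fold hn hin (n - (i + 2)) (by omega) _ hs2 ht2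
    refine ⟨hfold.1, TblEq_congr ?_ hfold.2⟩
    intro a b ha hb
    unfold rowsDone rowPart
    congr 1
    refine decide_eq_decide.mpr ?_
    have hb' : b < i + 2 + (n - (i + 2)) := by omega
    constructor <;> intro hx <;> omega
  · rw [if_neg hi1]
    have hrange : n - (i + 2) = 0 := by omega
    rw [hrange]
    simp only [List.range'_zero, List.foldl_nil]
    refine ⟨hs1, TblEq_congr ?_ ht1⟩
    intro a b ha hb
    unfold rowsDone rowPart
    congr 1
    refine decide_eq_decide.mpr ?_
    constructor <;> intro hx <;> omega

theorem rows_fold {cs : List Char} {n : Nat} (hn : n = cs.length) :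
    ∀ m, m ≤ n → ∀ dp, Shape n dp → TblEq n dp (rowsDone cs m) →
      Shape n (((List.range m).reverse).foldl (lc1745Row cs n) dp) ∧
      TblEq n (((List.range m).reverse).foldl (lc1745Row cs n) dp) (rowsDone cs 0) := by
  intro m
  induction m with
  | zero => intro _ dp hs ht; exact ⟨hs, ht⟩
  | succ m ih =>
    intro hm dp hs ht
    rw [List.range_succ, List.reverse_append]
    simp only [List.reverse_singleton, List.singleton_append, List.foldl_cons]
    have hrow := row_step hn (by omega) hs ht
    exact ih (by omega) _ hrow.1 hrow.2

theorem final_table (cs : List Char) : TblEq cs.length (lc1745Table cs) (rowsDone cs 0) := by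
  have hshape : Shape cs.length (List.replicate cs.length (List.replicate cs.length (0 : Int))) := by
    refine ⟨by simp, ?_⟩
    intro r hr
    rw [List.getD_eq_getElem?_getD, List.getElem?_replicate, if_pos hr]
    simp
  have hinit : TblEq cs.length (List.replicate cs.length (List.replicate cs.length (0 : Int)))
      (rowsDone cs cs.length) := by
    intro i j hi hj
    have hz : pvGet2 (List.replicate cs.length (List.replicate cs.length (0 : Int))) i j = 0 := by
      unfold pvGet2
      have houter : (List.replicate cs.length (List.replicate cs.length (0 : Int))).getD i []
          = List.replicate cs.length 0 := by
        rw [List.getD_eq_getElem?_getD, List.getElem?_replicate, if_pos hi]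
        rfl
      rw [houter, List.getD_eq_getElem?_getD, List.getElem?_replicate, if_pos hj]
      rfl
    rw [hz]
    have hc : ¬(cs.length ≤ i ∧ i ≤ j) := by omega
    simp [rowsDone, hc]
  exact (rows_fold rfl cs.length (le_refl _) _ hshape hinit).2

theorem lc_1745_eq (s : String) : lc_1745 s = lc_1745_alt s := by
  unfold lc_1745 lc_1745_alt lc1745Scan
  set cs := s.toList with hcs
  set n := cs.length with hn
  have htbl : TblEq n (lc1745Table cs) (rowsDone cs 0) := final_table cs
  refine PySem.List.any_congr_mem ?_
  intro i hi
  rw [List.mem_range'] at hi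
  obtain ⟨t, ht, hit⟩ := hi
  have hi1 : 1 ≤ i := by omega
  have hi2 : i + 1 < n := by omega
  rw [show n - (i + 1) = n - 1 - i from by omega,
    List.range'_eq_map_range (s := i), List.any_map,
    List.range'_eq_map_range (s := i + 1), List.any_map]
  refine PySem.List.any_congr_mem ?_
  intro t' ht'
  rw [List.mem_range] at ht'
  simp only [Function.comp_apply]
  have hjn : i + t' + 1 < n := by omega
  have h1 : pvGet2 (lc1745Table cs) i (i + t') = if palB cs i (i + t') then 1 else 0 := by
    rw [htbl i (i + t') (by omega) (by omega)]
    have hc : (0 ≤ i ∧ i ≤ i + t') := by omega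
    simp [rowsDone, hc]
  have h2 : pvGet2 (lc1745Table cs) 0 (i - 1) = if palB cs 0 (i - 1) then 1 else 0 := by
    rw [htbl 0 (i - 1) (by omega) (by omega)]
    have hc : (0 ≤ (0:Nat) ∧ 0 ≤ i - 1) := by omega
    simp [rowsDone, hc]
  have h3 : pvGet2 (lc1745Table cs) (i + t' + 1) (n - 1) =
      if palB cs (i + t' + 1) (n - 1) then 1 else 0 := by
    rw [htbl (i + t' + 1) (n - 1) (by omega) (by omega)]
    have hc : (0 ≤ i + t' + 1 ∧ i + t' + 1 ≤ n - 1) := by omega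
    simp [rowsDone, hc]
  have e1 : palB cs 0 (i - 1) = pvIsPal (cs.take i) := by
    unfold palB
    rw [show i - 1 + 1 - 0 = i from by omega]
    simp
  have e2 : palB cs i (i + t') = pvIsPal ((cs.drop i).take (i + 1 + t' - i)) := by
    unfold palB
    rw [show i + t' + 1 - i = i + 1 + t' - i from by omega]
  have e3 : palB cs (i + t' + 1) (n - 1) = pvIsPal (cs.drop (i + 1 + t')) := by
    unfold palB
    have hlen : (cs.drop (i + t' + 1)).length = n - 1 + 1 - (i + t' + 1) := by
      simp [← hn]
      omega
    rw [← hlen, List.take_length]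
    rw [show i + 1 + t' = i + t' + 1 from by omega]
  rw [show i + 1 + t' = i + t' + 1 from by omega] at e2 e3 ⊢
  rw [h1, h2, h3, ← e1, ← e2, ← e3]
  rcases b1 : palB cs i (i + t') <;> rcases b2 : palB cs 0 (i - 1) <;>
    rcases b3 : palB cs (i + t' + 1) (n - 1) <;> simp

-- ===== VERDICT (by name: the statement is the Claim_ definition above) =====
theorem lc_1745_spec : Claim_equal_lc_1745 := by
  intro s _
  exact lc_1745_eq s
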